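-- pv_equiv track=rewrite | github.com/yuliakachurovska/AlgoDataStruct | hw03/t03_04_e27.py | solve
-- ===== SOURCE A (Python) =====
-- from math import log2, floor
--
-- def cyclic_shift(n, amount_bit):
--     high_bit = n >> (amount_bit-1)
--     res = ((n << 1) + high_bit) & ((1 << amount_bit) - 1)
--     return res
--
-- def solve(n):
--     am_bit = floor(log2(n)+1)
--     res = n
--     for i in range(am_bit - 1):
--         n = cyclic_shift(n, am_bit)
--         if n > res:
--             res = n
--     return res
-- ===== SOURCE B (Python) =====
-- from math import log2, floor
--
-- def solve(n):
--     # same width computation as A (raises ValueError for n <= 0, like A)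
--     am_bit = floor(log2(n) + 1)
--     # MSB-first bit list of n's low am_bit bits
--     bits = [(n >> (am_bit - 1 - j)) & 1 for j in range(am_bit)]
--     best = n
--     for i in range(am_bit):
--         rot = bits[i:] + bits[:i]
--         v = 0
--         for b in rot:
--             v = v * 2 + b
--         if v > best:
--             best = v
--     return best
-- ===== Notes on version B (the rewrite author's own statement) =====
-- stated objective: alternative
-- what changed: B replaces A's loop of single-bit rotate-with-carry arithmetic by building the MSB-first bit list once and taking the maximum over its slice rotations bits[i:]+bits[:i] re-read as numbers.
import Mathlib
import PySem

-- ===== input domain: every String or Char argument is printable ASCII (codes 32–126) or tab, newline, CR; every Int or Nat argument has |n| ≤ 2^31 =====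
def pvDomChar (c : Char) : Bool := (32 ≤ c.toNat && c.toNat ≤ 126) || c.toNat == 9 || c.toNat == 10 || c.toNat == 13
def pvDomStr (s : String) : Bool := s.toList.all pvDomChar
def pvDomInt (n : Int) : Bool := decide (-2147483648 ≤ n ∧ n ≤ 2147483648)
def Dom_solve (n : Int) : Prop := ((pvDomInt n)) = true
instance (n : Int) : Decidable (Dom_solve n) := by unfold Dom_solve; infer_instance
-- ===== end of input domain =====

-- B replaces A's iterated rotate-with-carry arithmetic by rotating an MSB-first bit list with slices; alternative representation, same result.

-- ===== PORT A =====
-- shift amounts are nonnegative at every call site (amount_bit = floor(log2 n)+1 ≥ 1), so .toNat is exact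
def cyclicShift (n amountBit : Int) : Int :=
  let highBit := n >>> (amountBit - 1).toNat
  PySem.Int.band ((n <<< (1 : Nat)) + highBit) (((1 : Int) <<< amountBit.toNat) - 1)

-- floor(log2(n)+1) = bitLength n exactly for 1 ≤ n ≤ 2^31 (double rounding cannot interfere below 2^53);
-- for n ≤ 0 Python raises ValueError, excluded by Pre_solve
def solve (n : Int) : Int :=
  let amBit : Nat := PySem.Int.bitLength n
  ((List.range (amBit - 1)).foldl
    (fun (st : Int × Int) _ =>
      let n' := cyclicShift st.1 (amBit : Int)
      (n', if st.2 < n' then n' else st.2)) (n, n)).2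

-- ===== PORT B =====
def valOf (bs : List Int) : Int := bs.foldl (fun v b => v * 2 + b) 0

-- bits[i:] + bits[:i] with 0 ≤ i < len bits is exactly bits.drop i ++ bits.take i
def solve_alt (n : Int) : Int :=
  let amBit : Nat := PySem.Int.bitLength n
  let bits : List Int := (List.range amBit).map (fun j => PySem.Int.band (n >>> (amBit - 1 - j)) 1)
  (List.range amBit).foldl
    (fun best i =>
      let v := valOf (bits.drop i ++ bits.take i)
      if best < v then v else best) n

-- ===== PRECONDITION & SPEC =====
-- Pre_ excludes n ≤ 0, on which A raises ValueError (math.log2 of a non-positive number)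
def Pre_solve (n : Int) : Prop := 1 ≤ n
instance (n : Int) : Decidable (Pre_solve n) := by unfold Pre_solve; infer_instance
def pvWitness_solve : Int := 5

def Spec_solve (n : Int) (out : Int) : Prop := out = solve_alt n
instance (n : Int) (out : Int) : Decidable (Spec_solve n out) := by unfold Spec_solve; infer_instance

-- ===== CLAIM (what is proved, stated in full; the proofs are below) =====
def Claim_equal_solve : Prop := ∀ (n : Int), Dom_solve n → Pre_solve n → Spec_solve n (solve n)

-- ===== LEMMAS AND PROOFS =====

-- value of rotating the L-bit number m left by i positions
def rotN (L m i : Nat) : Nat := (m % 2 ^ (L - i)) * 2 ^ i + m / 2 ^ (L - i)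

-- MSB-first list of the low t bits of x, as Ints
def natBits (x t : Nat) : List Int := (List.range t).map (fun j => ((x / 2 ^ (t - 1 - j)) % 2 : Nat))

-- running maximum over rotations 1..k, seeded with m
def bestN (L m : Nat) : Nat → Nat
  | 0 => m
  | k + 1 => if bestN L m k < rotN L m (k + 1) then rotN L m (k + 1) else bestN L m k

theorem rotN_zero (L m : Nat) (hm : m < 2 ^ L) : rotN L m 0 = m := by
  simp [rotN, Nat.mod_eq_of_lt hm, Nat.div_eq_of_lt hm]

theorem rotN_lt (L m i : Nat) (hm : m < 2 ^ L) : rotN L m i < 2 ^ L := by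
  unfold rotN
  have h1 : m % 2 ^ (L - i) < 2 ^ (L - i) := Nat.mod_lt _ (Nat.two_pow_pos _)
  by_cases hi : i ≤ L
  · have hsplit : 2 ^ L = 2 ^ (L - i) * 2 ^ i := by rw [← pow_add]; congr 1; omega
    have h2 : m / 2 ^ (L - i) < 2 ^ i := by
      apply Nat.div_lt_of_lt_mul; omega
    have h3 : (m % 2 ^ (L - i) + 1) * 2 ^ i ≤ 2 ^ (L - i) * 2 ^ i :=
      Nat.mul_le_mul_right _ (by omega)
    rw [add_mul, one_mul] at h3
    omega
  · have h0 : L - i = 0 := by omega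
    rw [h0]
    simpa [Nat.mod_one] using hm

theorem rotN_succ (L m i : Nat) (hi : i + 1 ≤ L) (hm : m < 2 ^ L) :
    (rotN L m i % 2 ^ (L - 1)) * 2 + rotN L m i / 2 ^ (L - 1) = rotN L m (i + 1) := by
  unfold rotN
  set t := L - i with ht
  have ht1 : 1 ≤ t := by omega
  have hLt : L - (i+1) = t - 1 := by omega
  set a := m % 2 ^ t with ha
  set b := m / 2 ^ t with hb
  have hbi : b < 2 ^ i := by
    apply Nat.div_lt_of_lt_mul
    calc m < 2 ^ L := hm
    _ = 2 ^ t * 2 ^ i := by rw [← pow_add]; congr 1; omega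
  set c := a / 2 ^ (t-1) with hc
  set d := a % 2 ^ (t-1) with hd
  have hpt : 2 ^ t = 2 ^ (t-1) * 2 := by rw [← pow_succ]; congr 1; omega
  have hat : a < 2 ^ t := Nat.mod_lt _ (by positivity)
  have hc1 : c ≤ 1 := by
    apply Nat.lt_succ_iff.mp
    apply Nat.div_lt_of_lt_mul; omega
  have hdlt : d < 2 ^ (t-1) := Nat.mod_lt _ (by positivity)
  have hadec : a = 2 ^ (t-1) * c + d := by rw [hc, hd]; exact (Nat.div_add_mod a _).symm
  have hmdec : m = 2 ^ t * b + a := by rw [ha, hb]; exact (Nat.div_add_mod m _).symm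
  have hL1 : 2 ^ (L-1) = 2 ^ (t-1) * 2 ^ i := by rw [← pow_add]; congr 1; omega
  have hy : a * 2 ^ i + b = c * 2 ^ (L-1) + (d * 2 ^ i + b) := by rw [hL1]; nlinarith [hadec]
  have hrem : d * 2 ^ i + b < 2 ^ (L-1) := by
    rw [hL1]; nlinarith [hdlt, hbi, Nat.one_le_two_pow (n := i)]
  have hdiv : (a * 2 ^ i + b) / 2 ^ (L-1) = c := by
    rw [hy, add_comm, Nat.add_mul_div_right _ _ (Nat.two_pow_pos _), Nat.div_eq_of_lt hrem]; omega
  have hmod : (a * 2 ^ i + b) % 2 ^ (L-1) = d * 2 ^ i + b := by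
    rw [hy, add_comm, Nat.add_mul_mod_self_right, Nat.mod_eq_of_lt hrem]
  rw [hdiv, hmod, hLt]
  have hm1 : m % 2 ^ (t-1) = d := by
    rw [hmdec, hadec, hpt]
    rw [show 2 ^ (t-1) * 2 * b + (2 ^ (t-1) * c + d) = d + (2*b + c) * 2 ^ (t-1) by ring]
    rw [Nat.add_mul_mod_self_right, Nat.mod_eq_of_lt hdlt]
  have hm2 : m / 2 ^ (t-1) = 2 * b + c := by
    rw [hmdec, hadec, hpt]
    rw [show 2 ^ (t-1) * 2 * b + (2 ^ (t-1) * c + d) = (2*b + c) * 2 ^ (t-1) + d by ring]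
    rw [add_comm, Nat.add_mul_div_right _ _ (Nat.two_pow_pos _), Nat.div_eq_of_lt hdlt]; omega
  rw [hm1, hm2, pow_succ]; ring

theorem cyclicShift_eq (x L : Nat) (hL : 1 ≤ L) (hx : x < 2 ^ L) :
    cyclicShift (x : Int) (L : Int) = (((x % 2 ^ (L - 1)) * 2 + x / 2 ^ (L - 1) : Nat) : Int) := by
  have h1 : ((L : Int) - 1).toNat = L - 1 := by omega
  have h2 : ((L : Int)).toNat = L := by omega
  unfold cyclicShift
  rw [h1, h2]
  have hsr : ((x : Int) >>> (L-1)) = ((x >>> (L-1) : Nat) : Int) := rfl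
  have hsl : ((x : Int) <<< (1:Nat)) = ((x <<< 1 : Nat) : Int) := rfl
  have hone : ((1 : Int) <<< L) = (((1 <<< L : Nat)) : Int) := rfl
  have hpow : (1 : Nat) <<< L = 2 ^ L := by simp [Nat.shiftLeft_eq]
  have hge : 1 ≤ 2 ^ L := Nat.one_le_two_pow
  rw [hsr, hsl, hone, hpow]
  have h3 : ((2 ^ L : Nat) : Int) - 1 = ((2 ^ L - 1 : Nat) : Int) := by omega
  have h4 : ((x <<< 1 : Nat) : Int) + ((x >>> (L-1) : Nat) : Int)
      = (((x <<< 1) + (x >>> (L-1)) : Nat) : Int) := by push_cast; ring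
  have h5 : ∀ a b : Nat, PySem.Int.band (a : Int) (b : Int) = ((a &&& b : Nat) : Int) := by
    intro a b; simp [PySem.Int.band]
  simp only [h3, h4]
  rw [h5, Nat.and_two_pow_sub_one_eq_mod]
  congr 1
  rw [Nat.shiftLeft_eq, Nat.shiftRight_eq_div_pow]
  have hdec : x = 2^(L-1) * (x / 2^(L-1)) + x % 2^(L-1) := (Nat.div_add_mod x _).symm
  have hc : x / 2^(L-1) ≤ 1 := by
    have hlt : x < 2^(L-1) * 2 := by
      have : 2^L = 2^(L-1)*2 := by rw [← pow_succ]; congr 1; omega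
      omega
    have := Nat.div_lt_of_lt_mul hlt
    omega
  have hdlt : x % 2^(L-1) < 2^(L-1) := Nat.mod_lt _ (Nat.pos_of_ne_zero (by positivity))
  have hLL : 2^L = 2^(L-1)*2 := by rw [← pow_succ]; congr 1; omega
  have key : x * 2^1 + x / 2^(L-1) = ((x % 2^(L-1)) * 2 + x / 2^(L-1)) + (x / 2^(L-1)) * 2^L := by
    rw [hLL]; nlinarith [hdec]
  rw [key, Nat.add_mul_mod_self_right, Nat.mod_eq_of_lt (by omega)]

theorem band_natCast (a b : Nat) :
    PySem.Int.band ((a : Nat) : Int) ((b : Nat) : Int) = ((a &&& b : Nat) : Int) := by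
  simp [PySem.Int.band]

theorem valOf_append_single (l : List Int) (b : Int) : valOf (l ++ [b]) = valOf l * 2 + b := by
  simp [valOf, List.foldl_append]

theorem valOf_natBits (x t : Nat) : valOf (natBits x t) = ((x % 2 ^ t : Nat) : Int) := by
  induction t generalizing x with
  | zero => simp [valOf, natBits]
  | succ t ih =>
    have hsplit : natBits x (t+1) = natBits (x/2) t ++ [((x % 2 : Nat) : Int)] := by
      unfold natBits
      rw [List.range_succ, List.map_append]
      congr 1
      · apply List.map_congr_left
        intro j hj
        have hj' : j < t := List.mem_range.mp hj
        have : x / 2 ^ (t + 1 - 1 - j) = x / 2 / 2 ^ (t - 1 - j) := by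
          rw [Nat.div_div_eq_div_mul]
          congr 1
          rw [← pow_succ']
          congr 1; omega
        rw [this]
      · simp
    rw [hsplit, valOf_append_single, ih (x/2)]
    have : (x / 2 % 2 ^ t) * 2 + x % 2 = x % 2 ^ (t+1) := by
      set q := x / 2 with hq
      set r := x % 2 with hr
      set s := q / 2 ^ t with hs
      set u := q % 2 ^ t with hu
      have h1 : x = 2 * q + r := by omega
      have h2 : q = 2 ^ t * s + u := (Nat.div_add_mod q _).symm
      have h3 : u < 2 ^ t := Nat.mod_lt _ (Nat.two_pow_pos _)
      have h4 : r < 2 := Nat.mod_lt _ (by norm_num)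
      have hx : x = (u * 2 + r) + s * 2 ^ (t+1) := by rw [pow_succ]; nlinarith
      rw [hx, Nat.add_mul_mod_self_right, Nat.mod_eq_of_lt (by rw [pow_succ]; omega)]
    omega

theorem valOf_foldl_start (l : List Int) (v : Int) :
    l.foldl (fun v b => v * 2 + b) v = v * 2 ^ l.length + valOf l := by
  induction l generalizing v with
  | nil => simp [valOf]
  | cons b l ih =>
    simp only [List.foldl_cons, List.length_cons]
    rw [ih (v * 2 + b)]
    have : valOf (b :: l) = b * 2 ^ l.length + valOf l := by
      show (b :: l).foldl (fun v b => v * 2 + b) 0 = _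
      simp only [List.foldl_cons]
      rw [ih (0 * 2 + b)]
      ring_nf
    rw [this, pow_succ]
    ring

theorem valOf_append (l1 l2 : List Int) :
    valOf (l1 ++ l2) = valOf l1 * 2 ^ l2.length + valOf l2 := by
  unfold valOf
  rw [List.foldl_append]
  exact valOf_foldl_start l2 _

theorem length_natBits (x t : Nat) : (natBits x t).length = t := by
  simp [natBits]

theorem castIf (a b : Nat) : (if (a : Int) < (b : Int) then (b : Int) else (a : Int))
    = ((if a < b then b else a : Nat) : Int) := by
  split_ifs with h1 h2 h2 <;> first | rfl | omega

theorem natBits_split (x i k : Nat) :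
    natBits x (i + k) = natBits (x / 2 ^ k) i ++ natBits x k := by
  unfold natBits
  rw [List.range_add, List.map_append, List.map_map]
  congr 1
  · apply List.map_congr_left
    intro j hj
    have hj' : j < i := List.mem_range.mp hj
    have : x / 2 ^ (i + k - 1 - j) = x / 2 ^ k / 2 ^ (i - 1 - j) := by
      rw [Nat.div_div_eq_div_mul, ← pow_add,
        show k + (i - 1 - j) = i + k - 1 - j by omega]
    rw [this]
  · apply List.map_congr_left
    intro j hj
    have hj' : j < k := List.mem_range.mp hj
    have : i + k - 1 - (i + j) = k - 1 - j := by omega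
    simp only [Function.comp]
    rw [this]

-- rotating the bit list by slicing computes rotN
theorem valOf_rot (L m i : Nat) (hi : i < L) (hm : m < 2 ^ L) :
    valOf ((natBits m L).drop i ++ (natBits m L).take i) = ((rotN L m i : Nat) : Int) := by
  have hsplit : natBits m L
      = natBits (m / 2 ^ (L - i)) i ++ natBits m (L - i) := by
    have h := natBits_split m i (L - i)
    rwa [show i + (L - i) = L by omega] at h
  have hlen1 : (natBits (m / 2 ^ (L - i)) i).length = i := length_natBits _ _
  rw [hsplit, List.drop_left' hlen1, List.take_left' hlen1]
  rw [valOf_append, valOf_natBits, valOf_natBits, length_natBits]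
  have hdivlt : m / 2 ^ (L - i) < 2 ^ i := by
    apply Nat.div_lt_of_lt_mul
    calc m < 2 ^ L := hm
    _ = 2 ^ (L - i) * 2 ^ i := by rw [← pow_add]; congr 1; omega
  rw [Nat.mod_eq_of_lt hdivlt]
  unfold rotN
  push_cast
  ring

-- A's loop invariant: after k iterations the state is (rotation by k, best of rotations 0..k)
theorem A_inv (L m : Nat) (hL : 1 ≤ L) (hm : m < 2 ^ L) (k : Nat) (hk : k ≤ L - 1) :
    (List.range k).foldl
      (fun (st : Int × Int) _ =>
        let n' := cyclicShift st.1 (L : Int)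
        (n', if st.2 < n' then n' else st.2)) ((m : Int), (m : Int))
    = (((rotN L m k : Nat) : Int), ((bestN L m k : Nat) : Int)) := by
  induction k with
  | zero => simp [rotN_zero L m hm, bestN]
  | succ k ih =>
    rw [List.range_succ, List.foldl_append, ih (by omega)]
    simp only [List.foldl_cons, List.foldl_nil]
    have hlt : rotN L m k < 2 ^ L := rotN_lt L m k hm
    rw [cyclicShift_eq _ L hL hlt, rotN_succ L m k (by omega) hm]
    rw [castIf]
    rfl

-- B's fold over rotations 1..k equals bestN
theorem B_fold (L m : Nat) (k : Nat) :
    (List.range k).foldl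
      (fun (best : Int) j =>
        if best < ((rotN L m (1 + j) : Nat) : Int) then ((rotN L m (1 + j) : Nat) : Int) else best)
      ((m : Int))
    = ((bestN L m k : Nat) : Int) := by
  induction k with
  | zero => simp [bestN]
  | succ k ih =>
    rw [List.range_succ, List.foldl_append, ih]
    simp only [List.foldl_cons, List.foldl_nil]
    rw [castIf]
    have : 1 + k = k + 1 := by omega
    rw [this]
    rfl

theorem B_whole (L m : Nat) (hL : 1 ≤ L) (hm : m < 2 ^ L) :
    (List.range L).foldl
      (fun (best : Int) i =>
        if best < ((rotN L m i : Nat) : Int) then ((rotN L m i : Nat) : Int) else best)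
      ((m : Int))
    = ((bestN L m (L - 1) : Nat) : Int) := by
  obtain ⟨k, rfl⟩ : ∃ k, L = 1 + k := ⟨L - 1, by omega⟩
  rw [List.range_add, List.foldl_append, List.foldl_map]
  simp only [List.range_one, List.foldl_cons, List.foldl_nil]
  rw [rotN_zero _ m hm, if_neg (lt_irrefl _), show 1 + k - 1 = k by omega]
  exact B_fold (1 + k) m k

theorem solve_eq_solve_alt (n : Int) (hn : 1 ≤ n) : solve n = solve_alt n := by
  set L := PySem.Int.bitLength n with hLdef
  set m := n.toNat with hmdef
  have hnm : n = (m : Int) := by omega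
  have hmabs : n.natAbs = m := by omega
  have hmL : m < 2 ^ L := by
    have h := PySem.Int.lt_two_pow_bitLength n
    rw [← hLdef] at h
    omega
  have hm1 : 1 ≤ m := by omega
  have hL1 : 1 ≤ L := by
    by_contra h
    have : L = 0 := by omega
    rw [this] at hmL
    simp at hmL
    omega
  -- identify B's bit list with natBits m L
  have hbits : (List.range L).map (fun j => PySem.Int.band (n >>> (L - 1 - j)) 1)
      = natBits m L := by
    unfold natBits
    apply List.map_congr_left
    intro j _
    rw [hnm]
    have hsr : ((m : Int) >>> (L - 1 - j)) = ((m >>> (L - 1 - j) : Nat) : Int) := rfl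
    rw [hsr, show (1 : Int) = ((1 : Nat) : Int) from rfl, band_natCast,
      Nat.and_one_is_mod, Nat.shiftRight_eq_div_pow]
  -- unfold both ports
  unfold solve solve_alt
  rw [← hLdef]
  simp only []
  rw [hbits, hnm]
  rw [A_inv L m hL1 hmL (L - 1) le_rfl]
  -- replace B's step by the rotN-valued step (they agree on members of range L)
  have hstep : (List.range L).foldl
      (fun (best : Int) i =>
        let v := valOf ((natBits m L).drop i ++ (natBits m L).take i)
        if best < v then v else best) ((m : Int))
      = (List.range L).foldl
      (fun (best : Int) i =>
        if best < ((rotN L m i : Nat) : Int) then ((rotN L m i : Nat) : Int) else best)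
      ((m : Int)) := by
    apply PySem.List.foldl_congr_mem
    intro b i hi
    have hiL : i < L := List.mem_range.mp hi
    rw [valOf_rot L m i hiL hmL]
  rw [hstep, B_whole L m hL1 hmL]

-- ===== VERDICT (by name: the statement is the Claim_ definition above) =====
theorem solve_spec : Claim_equal_solve := by
  intro n _ hpre
  unfold Spec_solve
  exact solve_eq_solve_alt n hpre
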